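-- pv_equiv track=rewrite | github.com/keshavbhandari/yinyang | phrase_refiner/transformations.py | group_by_bar
-- ===== SOURCE A (Python) =====
-- def group_by_bar(events):
--     grouped_events = {}
--
--     for event in events:
--         bar_number = event[0]
--
--         if bar_number not in grouped_events:
--             grouped_events[bar_number] = []
--
--         grouped_events[bar_number].append(event)
--
--     return list(grouped_events.values())
-- ===== SOURCE B (Python) =====
-- def group_by_bar(events):
--     keys = []
--     for e in events:
--         if e[0] not in keys:
--             keys.append(e[0])
--     return [[e for e in events if e[0] == k] for k in keys]
-- ===== Notes on version B (the rewrite author's own statement) =====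
-- stated objective: alternative
-- what changed: Replaces the single-pass dict accumulation with a two-phase index-then-scan: first collect the distinct bar numbers in first-appearance order, then build each group by filtering the whole event list per key.
import Mathlib
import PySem

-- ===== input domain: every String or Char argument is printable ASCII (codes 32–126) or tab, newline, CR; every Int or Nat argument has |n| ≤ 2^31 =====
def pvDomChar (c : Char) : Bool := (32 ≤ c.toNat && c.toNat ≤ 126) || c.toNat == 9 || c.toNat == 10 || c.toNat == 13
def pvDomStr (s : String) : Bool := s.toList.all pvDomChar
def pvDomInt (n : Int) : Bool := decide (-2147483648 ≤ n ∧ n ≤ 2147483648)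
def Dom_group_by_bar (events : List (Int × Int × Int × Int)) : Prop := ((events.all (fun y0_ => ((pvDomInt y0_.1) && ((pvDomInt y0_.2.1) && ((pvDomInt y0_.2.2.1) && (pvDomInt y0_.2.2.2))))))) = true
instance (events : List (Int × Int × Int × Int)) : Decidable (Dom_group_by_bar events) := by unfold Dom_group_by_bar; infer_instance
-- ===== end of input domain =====

-- B replaces A's single-pass dict accumulation by a two-phase index-then-scan (distinct keys in
-- first-appearance order, then one filter of the full list per key); alternative decomposition, not faster.


-- ===== PORT A =====
-- for event in events: if bar not in grouped: grouped[bar] = []; grouped[bar].append(event)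
def group_by_bar (events : List (Int × Int × Int × Int)) : List (List (Int × Int × Int × Int)) :=
  (events.foldl
    (fun grouped event =>
      let bar := event.1
      let grouped := if grouped.contains bar then grouped else grouped.insert bar []
      grouped.modify bar [] (fun l => l ++ [event]))
    PySem.Dict.empty).values

-- ===== PORT B =====
-- keys = distinct bar numbers in first-appearance order; then one filter pass per key
def group_by_bar_alt (events : List (Int × Int × Int × Int)) : List (List (Int × Int × Int × Int)) :=
  let keys := PySem.Set.ofList (events.map (fun e => e.1))
  keys.map (fun k => events.filter (fun e => e.1 == k))

-- ===== PRECONDITION & SPEC =====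
def Spec_group_by_bar (events : List (Int × Int × Int × Int)) (out : List (List (Int × Int × Int × Int))) : Prop := out = group_by_bar_alt events
instance (events : List (Int × Int × Int × Int)) (out : List (List (Int × Int × Int × Int))) : Decidable (Spec_group_by_bar events out) := by unfold Spec_group_by_bar; infer_instance

-- ===== CLAIM (what is proved, stated in full; the proofs are below) =====
def Claim_equal_group_by_bar : Prop := ∀ (events : List (Int × Int × Int × Int)), Dom_group_by_bar events → Spec_group_by_bar events (group_by_bar events)

-- ===== LEMMAS AND PROOFS =====

-- A's 'if absent: d[k]=[]; d[k].append(e)' step is exactly one Dict.modify with default []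
theorem step_eq_modify (d : PySem.Dict Int (List (Int × Int × Int × Int)))
    (e : Int × Int × Int × Int) :
    (if d.contains e.1 then d else d.insert e.1 []).modify e.1 [] (fun l => l ++ [e])
      = d.modify e.1 [] (fun l => l ++ [e]) := by
  by_cases h : d.contains e.1 = true
  · simp [h]
  · have hne : ∀ p ∈ d.items, p.1 ≠ e.1 := by
      intro p hp hpe
      apply h
      rw [PySem.Dict.contains_eq_decide_mem_keys, decide_eq_true_eq, ← hpe]
      simp only [PySem.Dict.keys]
      exact List.mem_map_of_mem hp
    have hgd : d.getD e.1 [] = ([] : List (Int × Int × Int × Int)) := by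
      exact PySem.Dict.getD_of_not_contains d [] (by simpa using h)
    apply PySem.Dict.ext
    simp only [h, Bool.false_eq_true, if_false]
    simp only [PySem.Dict.modify, PySem.Dict.items_insert, h, Bool.false_eq_true, if_false,
      PySem.Dict.contains_insert_self, if_true, PySem.Dict.getD_insert_self, hgd,
      List.nil_append, List.map_append]
    rw [List.map_congr_left (g := id) (by intro p hp; simp [hne p hp]), List.map_id]
    simp

theorem foldl_step_eq (l : List (Int × Int × Int × Int))
    (d : PySem.Dict Int (List (Int × Int × Int × Int))) :
    l.foldl
      (fun grouped event =>
        let bar := event.1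
        let grouped := if grouped.contains bar then grouped else grouped.insert bar []
        grouped.modify bar [] (fun l => l ++ [event])) d
      = l.foldl (fun d e => d.modify e.1 [] (fun l => l ++ [e])) d := by
  induction l generalizing d with
  | nil => rfl
  | cons e l ih => simp only [List.foldl_cons]; rw [ih, step_eq_modify]

theorem group_by_bar_eq_fold_modify (events : List (Int × Int × Int × Int)) :
    group_by_bar events
      = (events.foldl (fun d e => d.modify e.1 [] (fun l => l ++ [e])) PySem.Dict.empty).values := by
  unfold group_by_bar
  rw [foldl_step_eq]

theorem group_by_bar_spec' (events : List (Int × Int × Int × Int)) :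
    group_by_bar events = group_by_bar_alt events := by
  rw [group_by_bar_eq_fold_modify]
  have hnd : (events.foldl (fun d e => d.modify e.1 [] (fun l => l ++ [e]))
      (PySem.Dict.empty : PySem.Dict Int (List (Int × Int × Int × Int)))).keys.Nodup := by
    exact PySem.Dict.nodup_keys_foldl_modify_key events (fun e => e.1) []
      (fun d e => fun l => l ++ [e]) PySem.Dict.empty (by simp)
  rw [PySem.Dict.values_eq_map_keys _ hnd []]
  have hkeys : (events.foldl (fun d e => d.modify e.1 [] (fun l => l ++ [e]))
      (PySem.Dict.empty : PySem.Dict Int (List (Int × Int × Int × Int)))).keys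
      = PySem.Set.ofList (events.map (fun e => e.1)) := by
    rw [PySem.Dict.keys_foldl_modify_key events (fun e => e.1) []
      (fun d e => fun l => l ++ [e]) PySem.Dict.empty]
    simp [PySem.Dict.keys_empty, PySem.Set.update_nil_left]
  rw [hkeys]
  unfold group_by_bar_alt
  apply List.map_congr_left
  intro k _
  have hmap : events.foldl (fun d e => d.modify e.1 [] (fun l => l ++ [e]))
      (PySem.Dict.empty : PySem.Dict Int (List (Int × Int × Int × Int)))
      = (events.map (fun e => (e.1, e))).foldl (fun d p => d.modify p.1 [] (fun l => l ++ [p.2]))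
        PySem.Dict.empty := by
    rw [List.foldl_map]
  rw [hmap, PySem.Dict.getD_foldl_modify_append]
  simp [List.filter_map, List.map_map, PySem.Dict.getD_empty, Function.comp_def]

-- ===== VERDICT (by name: the statement is the Claim_ definition above) =====
theorem group_by_bar_spec : Claim_equal_group_by_bar := by
  intro events _
  exact group_by_bar_spec' events
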